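-- pv_equiv track=rewrite | github.com/RajputVikashS5/Elixi-AI | python-core/automation/coding_assistant.py | _parse_documentation_sections
-- ===== SOURCE A (Python) =====
-- from typing import Any, Dict, Optional, List
--
-- def _parse_documentation_sections(doc: str) -> Dict[str, str]:
--     """Parse documentation into sections."""
--     sections = {}
--     current_section = None
--     current_content = []
--
--     for line in doc.split('\n'):
--         if line.startswith('#'):
--             if current_section:
--                 sections[current_section] = '\n'.join(current_content)
--             current_section = line.strip('#').strip()
--             current_content = []
--         else:
--             current_content.append(line)
--
--     if current_section:
--         sections[current_section] = '\n'.join(current_content)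
--
--     return sections
-- ===== SOURCE B (Python) =====
-- def _parse_documentation_sections(doc: str) -> dict:
--     """Parse documentation into sections by one backward pass: walking the lines
--     from the end, each header's content is already at hand when the header is met,
--     so no current-section state or final flush is needed."""
--     pairs = []
--     content = []
--     for line in reversed(doc.split('\n')):
--         if line.startswith('#'):
--             name = line.strip('#').strip()
--             if name:
--                 pairs.append((name, '\n'.join(reversed(content))))
--             content = []
--         else:
--             content.append(line)
--     sections = {}
--     for name, text in reversed(pairs):
--         sections[name] = text
--     return sections
-- ===== Notes on version B (the rewrite author's own statement) =====
-- stated objective: alternative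
-- what changed: A scans forward keeping a current-section name and pending content with a final flush after the loop; B makes one backward pass over the lines, emitting each (name, content) pair the moment its header line is reached (no carried section state, no trailing flush), then builds the dict from the collected pairs.
import Mathlib
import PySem

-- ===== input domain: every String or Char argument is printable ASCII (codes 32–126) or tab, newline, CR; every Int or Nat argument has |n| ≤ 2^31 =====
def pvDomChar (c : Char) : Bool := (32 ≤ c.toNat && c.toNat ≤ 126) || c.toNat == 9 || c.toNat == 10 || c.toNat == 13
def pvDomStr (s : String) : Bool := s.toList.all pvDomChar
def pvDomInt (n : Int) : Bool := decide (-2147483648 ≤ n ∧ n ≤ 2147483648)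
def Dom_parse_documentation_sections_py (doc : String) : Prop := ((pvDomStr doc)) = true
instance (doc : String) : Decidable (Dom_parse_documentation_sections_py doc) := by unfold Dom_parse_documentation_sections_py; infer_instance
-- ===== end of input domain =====

-- B replaces A's stateful forward scan (current section + final flush) by a single backward
-- pass that emits each section the moment its header is met; objective: alternative (same cost).

-- ===== PORT A =====
-- loop body of A: state = (sections, current_section, current_content)
def pvA_step (st : PySem.Dict String String × Option String × List String) (line : String) :
    PySem.Dict String String × Option String × List String :=
  let (sections, cur, content) := st
  if PySem.Str.startswith line "#" then
    let sections :=
      match cur with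
      | some s => if s ≠ "" then sections.insert s (PySem.Str.join "\n" content) else sections
      | none => sections
    (sections, some (PySem.Str.strip (PySem.Str.stripChars line "#")), [])
  else
    (sections, cur, content ++ [line])

-- A's trailing 'if current_section: sections[current_section] = …'
def pvA_flush (st : PySem.Dict String String × Option String × List String) :
    PySem.Dict String String :=
  let (sections, cur, content) := st
  match cur with
  | some s => if s ≠ "" then sections.insert s (PySem.Str.join "\n" content) else sections
  | none => sections

def parse_documentation_sections_py (doc : String) : List (String × String) :=
  (pvA_flush (((PySem.Str.split? doc "\n").getD []).foldl pvA_step (PySem.Dict.empty, none, []))).items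

-- ===== PORT B =====
-- loop body of B's backward pass: state = (pairs, content)
def pvB_step (st : List (String × String) × List String) (line : String) :
    List (String × String) × List String :=
  if PySem.Str.startswith line "#" then
    let name := PySem.Str.strip (PySem.Str.stripChars line "#")
    (if name ≠ "" then st.1 ++ [(name, PySem.Str.join "\n" st.2.reverse)] else st.1, [])
  else
    (st.1, st.2 ++ [line])

def parse_documentation_sections_py_alt (doc : String) : List (String × String) :=
  let r := (((PySem.Str.split? doc "\n").getD []).reverse).foldl pvB_step ([], [])
  (r.1.reverse.foldl (fun (d : PySem.Dict String String) p => d.insert p.1 p.2)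
     PySem.Dict.empty).items

-- ===== PRECONDITION & SPEC =====
def Spec_parse_documentation_sections_py (doc : String) (out : List (String × String)) : Prop := out = parse_documentation_sections_py_alt doc
instance (doc : String) (out : List (String × String)) : Decidable (Spec_parse_documentation_sections_py doc out) := by unfold Spec_parse_documentation_sections_py; infer_instance

-- ===== CLAIM (what is proved, stated in full; the proofs are below) =====
def Claim_equal_parse_documentation_sections_py : Prop := ∀ (doc : String), Dom_parse_documentation_sections_py doc → Spec_parse_documentation_sections_py doc (parse_documentation_sections_py doc)

-- ===== LEMMAS AND PROOFS =====

-- "line does not start with '#'"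
def pvNonH (l : String) : Bool := !(PySem.Str.startswith l "#")

-- the (name, joined content) pairs of the successive '#'-headed blocks of a line list
def pvSegs : List String → List (String × String)
  | [] => []
  | l :: ls =>
    if PySem.Str.startswith l "#" then
      (PySem.Str.strip (PySem.Str.stripChars l "#"),
        PySem.Str.join "\n" (ls.takeWhile pvNonH)) :: pvSegs (ls.dropWhile pvNonH)
    else
      pvSegs ls
termination_by ls => ls.length
decreasing_by
  · exact Nat.lt_succ_of_le (List.length_dropWhile_le _ _)
  · simp

def pvIns (d : PySem.Dict String String) (s v : String) : PySem.Dict String String :=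
  if s ≠ "" then d.insert s v else d

def pvFins (d : PySem.Dict String String) (ps : List (String × String)) :
    PySem.Dict String String :=
  ps.foldl (fun d p => pvIns d p.1 p.2) d

theorem pvSegs_nil : pvSegs [] = [] := by rw [pvSegs]

theorem pvSegs_cons_pos {l : String} (ls : List String)
    (h : PySem.Str.startswith l "#" = true) :
    pvSegs (l :: ls) = (PySem.Str.strip (PySem.Str.stripChars l "#"),
      PySem.Str.join "\n" (ls.takeWhile pvNonH)) :: pvSegs (ls.dropWhile pvNonH) := by
  rw [pvSegs, if_pos h]

theorem pvSegs_cons_neg {l : String} (ls : List String)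
    (h : ¬ PySem.Str.startswith l "#" = true) :
    pvSegs (l :: ls) = pvSegs ls := by
  rw [pvSegs, if_neg h]

theorem pvTakeWhile_cons_pos {l : String} (ls : List String)
    (h : PySem.Str.startswith l "#" = true) :
    (l :: ls).takeWhile pvNonH = [] := by
  rw [List.takeWhile_cons, if_neg (by simp [pvNonH]; simpa using h)]

theorem pvTakeWhile_cons_neg {l : String} (ls : List String)
    (h : ¬ PySem.Str.startswith l "#" = true) :
    (l :: ls).takeWhile pvNonH = l :: ls.takeWhile pvNonH := by
  rw [List.takeWhile_cons, if_pos (by simp [pvNonH]; simpa using h)]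

theorem pvDropWhile_cons_pos {l : String} (ls : List String)
    (h : PySem.Str.startswith l "#" = true) :
    (l :: ls).dropWhile pvNonH = l :: ls := by
  rw [List.dropWhile_cons, if_neg (by simp [pvNonH]; simpa using h)]

theorem pvDropWhile_cons_neg {l : String} (ls : List String)
    (h : ¬ PySem.Str.startswith l "#" = true) :
    (l :: ls).dropWhile pvNonH = ls.dropWhile pvNonH := by
  rw [List.dropWhile_cons, if_pos (by simp [pvNonH]; simpa using h)]

theorem pvSegs_dropWhile (ls : List String) :
    pvSegs (ls.dropWhile pvNonH) = pvSegs ls := by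
  induction ls with
  | nil => simp
  | cons l ls ih =>
    by_cases h : PySem.Str.startswith l "#" = true
    · rw [pvDropWhile_cons_pos ls h]
    · rw [pvDropWhile_cons_neg ls h, ih, pvSegs_cons_neg ls h]

theorem pvFins_cons (d : PySem.Dict String String) (p : String × String)
    (ps : List (String × String)) :
    pvFins d (p :: ps) = pvFins (pvIns d p.1 p.2) ps := by
  rw [pvFins, List.foldl_cons, pvFins]

theorem pvA2 (ls : List String) : ∀ (d : PySem.Dict String String) (s : String)
    (content : List String),
    pvA_flush (ls.foldl pvA_step (d, some s, content)) =
      pvFins (pvIns d s (PySem.Str.join "\n" (content ++ ls.takeWhile pvNonH)))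
        (pvSegs (ls.dropWhile pvNonH)) := by
  induction ls with
  | nil =>
    intro d s content
    simp [pvA_flush, pvFins, pvSegs_nil, pvIns]
  | cons l ls ih =>
    intro d s content
    by_cases h : PySem.Str.startswith l "#" = true
    · rw [List.foldl_cons, pvA_step]
      simp only [h, if_pos]
      rw [ih, pvDropWhile_cons_pos ls h, pvTakeWhile_cons_pos ls h,
        pvSegs_cons_pos ls h, pvFins_cons]
      simp [pvIns]
    · rw [List.foldl_cons, pvA_step]
      rw [if_neg h]
      rw [ih, pvDropWhile_cons_neg ls h, pvTakeWhile_cons_neg ls h]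
      simp

theorem pvA1 (ls : List String) : ∀ (d : PySem.Dict String String) (content : List String),
    pvA_flush (ls.foldl pvA_step (d, none, content)) = pvFins d (pvSegs ls) := by
  induction ls with
  | nil => intro d content; simp [pvA_flush, pvFins, pvSegs_nil]
  | cons l ls ih =>
    intro d content
    by_cases h : PySem.Str.startswith l "#" = true
    · rw [List.foldl_cons, pvA_step]
      simp only [h, if_pos]
      rw [pvA2, pvSegs_cons_pos ls h, pvFins_cons]
      simp [pvIns]
    · rw [List.foldl_cons, pvA_step]
      rw [if_neg h]
      rw [ih, pvSegs_cons_neg ls h]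

theorem pvB1 (ls : List String) :
    ls.foldr (fun line st => pvB_step st line) ([], []) =
      (((pvSegs ls).filter (fun p => p.1 ≠ "")).reverse, (ls.takeWhile pvNonH).reverse) := by
  induction ls with
  | nil => simp [pvSegs_nil]
  | cons l ls ih =>
    rw [List.foldr_cons, ih, pvB_step]
    by_cases h : PySem.Str.startswith l "#" = true
    · simp only [h, if_pos]
      rw [pvTakeWhile_cons_pos ls h, pvSegs_cons_pos ls h, ← pvSegs_dropWhile ls]
      by_cases hn : PySem.Str.strip (PySem.Str.stripChars l "#") ≠ ""
      · simp [hn, List.reverse_reverse]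
      · simp [hn]
    · rw [if_neg h]
      rw [pvTakeWhile_cons_neg ls h, pvSegs_cons_neg ls h]
      simp

theorem pvFins_filter (ps : List (String × String)) (d : PySem.Dict String String) :
    pvFins d ps =
      (ps.filter (fun p => p.1 ≠ "")).foldl (fun d p => d.insert p.1 p.2) d := by
  rw [pvFins]
  have := PySem.List.foldl_ite_eq_foldl_filter (p := fun p : String × String => p.1 ≠ "")
    (f := fun (d : PySem.Dict String String) (p : String × String) => d.insert p.1 p.2) ps d
  simp only [pvIns]
  exact this

-- ===== VERDICT (by name: the statement is the Claim_ definition above) =====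
theorem parse_documentation_sections_py_spec : Claim_equal_parse_documentation_sections_py := by
  intro doc _
  unfold Spec_parse_documentation_sections_py
  unfold parse_documentation_sections_py parse_documentation_sections_py_alt
  rw [List.foldl_reverse]
  have hb := pvB1 ((PySem.Str.split? doc "\n").getD [])
  simp only [hb]
  rw [pvA1, pvFins_filter]
  simp
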